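-- pv_equiv track=rewrite | github.com/lujanmaccari/gastos_personales | master/apps/utils/calculations.py | asignar_iconos_y_colores_categorias_gastos
-- ===== SOURCE A (Python) =====
-- def asignar_colores_categorias_gastos():
--     """Retorna colores específicos para categorías de gasto"""
--     colores = {
--         'comida': "#FFFB1C",      # Amarillo
--         'amarillo': "#FFFB1C",
--         'hogar': '#EF4444',       # Rojo
--         'rojo': '#EF4444',
--         'transporte': '#3B82F6',  # Azul
--         'azul': '#3B82F6',
--         'compras': '#8B5CF6',     # Violeta
--         'violeta': '#8B5CF6',
--         'servicios': '#06B6D4',   # Cyan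
--         'ocio': "#12CA31",        # Verde
--         'verde': "#12CA31",
--         'salud': "#A4E2FF",       # Celeste
--         'educación': '#D946EF',   # Rosa
--         'rosa': '#D946EF',
--         'viaje': '#FFA500',       # Naranja
--         'naranja': '#FFA500',
--         'otro': '#9CA3AF',        # Gris
--         'gris': '#9CA3AF',
--     }
--     return colores
--
-- def asignar_iconos_y_colores_categorias_gastos(items):
--     """
--     Asigna íconos y colores a fuentes de ingreso basándose en el nombre.
--
--     Args:
--         items: Lista de diccionarios con la clave 'fuente'
--
--     Returns:
--         list: Items con las claves 'icono', 'color_badge', y 'colores' agregadas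
--     """
--     colores_categorias = asignar_colores_categorias_gastos()
--
--     for i, item in enumerate(items):
--         # Obtener el nombre de la categoria (puede venir como 'categoria' o 'nombre')
--         nombre = item.get("categoria", item.get("nombre", ""))
--
--         if nombre is None:
--             nombre = "otro"
--         else:
--             nombre = nombre.lower()
--
--         # Asignar color del gráfico
--         item['color'] = colores_categorias.get(nombre, colores_categorias['otro'])
--
--         # Asignar ícono y color del badge según el nombre
--         if "comida" in nombre or "alimentos" in nombre:
--             item["icono"] = "fas fa-utensils"
--             item["color_icono"] = "text-yellow-500"
--             item["color_badge"] = "text-yellow-800 bg-yellow-100"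
--         elif "hogar" in nombre or "alquiler" in nombre:
--             item["icono"] = "fas fa-home"
--             item["color_icono"] = "text-red-500"
--             item["color_badge"] = "text-red-800 bg-red-100"
--         elif "transporte" in nombre or "movilidad"in nombre:
--             item["icono"] = "fas fa-bus"
--             item["color_icono"] = "text-blue-500"
--             item["color_badge"] = "text-blue-800 bg-blue-100"
--         elif "compras" in nombre or "shopping" in nombre:
--             item["icono"] = "fas fa-shopping-bag"
--             item["color_icono"] = "text-purple-500"
--             item["color_badge"] = "text-purple-800 bg-purple-100"
--         elif "servicios" in nombre:
--             item["icono"] = "fas fa-concierge-bell"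
--             item["color_icono"] = "text-cyan-500"
--             item["color_badge"] = "text-cyan-800 bg-cyan-100"
--         elif "ocio" in nombre or "entretenimiento" in nombre:
--             item["icono"] = "fas fa-film"
--             item["color_icono"] = "text-green-500"
--             item["color_badge"] = "text-green-800 bg-green-100"
--         elif "salud" in nombre:
--             item["icono"] = "fas fa-heartbeat"
--             item["color_icono"] = "text-sky-500"
--             item["color_badge"] = "text-sky-800 bg-sky-100"
--         elif "educación" in nombre:
--             item["icono"] = "fas fa-book"
--             item["color_icono"] = "text-pink-500"
--             item["color_badge"] = "text-pink-800 bg-pink-100"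
--         elif "viaje" in nombre or "vacaciones" in nombre:
--             item["icono"] = "fas fa-plane"
--             item["color_icono"] = "text-orange-500"
--             item["color_badge"] = "text-orange-800 bg-orange-100"
--         else:
--             item["icono"] = "fas fa-dollar-sign"
--             item["color_icono"] = "text-gray-500"
--             item["color_badge"] = "text-gray-800 bg-gray-100"
--
--     return items
-- ===== SOURCE B (Python) =====
-- # Different algorithm: instead of A's ordered first-match if/elif ladder, B maps
-- # every keyword to a rule index in ONE flat dict, computes the MINIMUM matching
-- # index over all keywords (default = last index), and indexes into a triple table.
-- # Mutates the items in place like A.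
--
-- def asignar_colores_categorias_gastos():
--     return {
--         'comida': "#FFFB1C",
--         'amarillo': "#FFFB1C",
--         'hogar': '#EF4444',
--         'rojo': '#EF4444',
--         'transporte': '#3B82F6',
--         'azul': '#3B82F6',
--         'compras': '#8B5CF6',
--         'violeta': '#8B5CF6',
--         'servicios': '#06B6D4',
--         'ocio': "#12CA31",
--         'verde': "#12CA31",
--         'salud': "#A4E2FF",
--         'educación': '#D946EF',
--         'rosa': '#D946EF',
--         'viaje': '#FFA500',
--         'naranja': '#FFA500',
--         'otro': '#9CA3AF',
--         'gris': '#9CA3AF',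
--     }
--
-- KEYWORD_RULE = {
--     'comida': 0, 'alimentos': 0,
--     'hogar': 1, 'alquiler': 1,
--     'transporte': 2, 'movilidad': 2,
--     'compras': 3, 'shopping': 3,
--     'servicios': 4,
--     'ocio': 5, 'entretenimiento': 5,
--     'salud': 6,
--     'educación': 7,
--     'viaje': 8, 'vacaciones': 8,
-- }
--
-- TRIPLES = [
--     ("fas fa-utensils", "text-yellow-500", "text-yellow-800 bg-yellow-100"),
--     ("fas fa-home", "text-red-500", "text-red-800 bg-red-100"),
--     ("fas fa-bus", "text-blue-500", "text-blue-800 bg-blue-100"),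
--     ("fas fa-shopping-bag", "text-purple-500", "text-purple-800 bg-purple-100"),
--     ("fas fa-concierge-bell", "text-cyan-500", "text-cyan-800 bg-cyan-100"),
--     ("fas fa-film", "text-green-500", "text-green-800 bg-green-100"),
--     ("fas fa-heartbeat", "text-sky-500", "text-sky-800 bg-sky-100"),
--     ("fas fa-book", "text-pink-500", "text-pink-800 bg-pink-100"),
--     ("fas fa-plane", "text-orange-500", "text-orange-800 bg-orange-100"),
--     ("fas fa-dollar-sign", "text-gray-500", "text-gray-800 bg-gray-100"),
-- ]
--
--
-- def asignar_iconos_y_colores_categorias_gastos(items):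
--     colores = asignar_colores_categorias_gastos()
--     for item in items:
--         nombre = item.get("categoria", item.get("nombre", ""))
--         nombre = "otro" if nombre is None else nombre.lower()
--         item['color'] = colores.get(nombre, colores['otro'])
--         idx = min((r for k, r in KEYWORD_RULE.items() if k in nombre),
--                   default=len(TRIPLES) - 1)
--         item['icono'], item['color_icono'], item['color_badge'] = TRIPLES[idx]
--     return items
-- ===== Notes on version B (the rewrite author's own statement) =====
-- stated objective: alternative
-- what changed: A's nine-branch ordered first-match if/elif ladder is replaced by one flat keyword-to-rule-index dict: B takes the MINIMUM rule index over all matching keywords (default = last index) and indexes into a triple table; correctness follows because the keyword indices are listed in ladder order, so the minimum matching index equals the first matching branch.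
import Mathlib
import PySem

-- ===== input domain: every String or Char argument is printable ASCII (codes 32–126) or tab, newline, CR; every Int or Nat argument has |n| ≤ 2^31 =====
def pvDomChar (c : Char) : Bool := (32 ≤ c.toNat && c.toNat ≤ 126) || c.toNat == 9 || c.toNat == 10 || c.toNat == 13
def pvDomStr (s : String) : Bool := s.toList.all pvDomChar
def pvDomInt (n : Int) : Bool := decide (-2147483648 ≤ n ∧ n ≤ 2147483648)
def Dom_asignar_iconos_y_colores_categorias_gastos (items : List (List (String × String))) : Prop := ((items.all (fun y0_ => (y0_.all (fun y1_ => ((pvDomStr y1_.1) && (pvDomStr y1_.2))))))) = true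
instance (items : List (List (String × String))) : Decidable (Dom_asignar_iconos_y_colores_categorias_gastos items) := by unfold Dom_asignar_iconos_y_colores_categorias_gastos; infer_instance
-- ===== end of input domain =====

-- B replaces A's ordered first-match if/elif ladder by a flat keyword→rule-index map,
-- taking the MINIMUM matching index (default = last) into a triple table (objective: alternative).
-- Both Pythons mutate the items in place; the equivalence proved here is about the RETURN value.

-- ===== PORT A =====
-- the colour dict returned by asignar_colores_categorias_gastos (literal, in source order)
def asignar_colores_categorias_gastos : PySem.Dict String String := PySem.Dict.ofList [
  ("comida", "#FFFB1C"), ("amarillo", "#FFFB1C"),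
  ("hogar", "#EF4444"), ("rojo", "#EF4444"),
  ("transporte", "#3B82F6"), ("azul", "#3B82F6"),
  ("compras", "#8B5CF6"), ("violeta", "#8B5CF6"),
  ("servicios", "#06B6D4"),
  ("ocio", "#12CA31"), ("verde", "#12CA31"),
  ("salud", "#A4E2FF"),
  ("educación", "#D946EF"), ("rosa", "#D946EF"),
  ("viaje", "#FFA500"), ("naranja", "#FFA500"),
  ("otro", "#9CA3AF"), ("gris", "#9CA3AF")]

-- one loop iteration of A (the dict values are str, so the 'nombre is None' branch is unreachable);
-- colores_categorias['otro'] is present in the literal dict, so getD with "" default is exact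
def pvProcessA (it : List (String × String)) : List (String × String) :=
  let item := PySem.Dict.mk it
  let nombre := PySem.Str.lower (item.getD "categoria" (item.getD "nombre" ""))
  let item := item.insert "color"
    (asignar_colores_categorias_gastos.getD nombre (asignar_colores_categorias_gastos.getD "otro" ""))
  let item :=
    if PySem.Str.isIn "comida" nombre || PySem.Str.isIn "alimentos" nombre then
      ((item.insert "icono" "fas fa-utensils").insert "color_icono" "text-yellow-500").insert "color_badge" "text-yellow-800 bg-yellow-100"
    else if PySem.Str.isIn "hogar" nombre || PySem.Str.isIn "alquiler" nombre then
      ((item.insert "icono" "fas fa-home").insert "color_icono" "text-red-500").insert "color_badge" "text-red-800 bg-red-100"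
    else if PySem.Str.isIn "transporte" nombre || PySem.Str.isIn "movilidad" nombre then
      ((item.insert "icono" "fas fa-bus").insert "color_icono" "text-blue-500").insert "color_badge" "text-blue-800 bg-blue-100"
    else if PySem.Str.isIn "compras" nombre || PySem.Str.isIn "shopping" nombre then
      ((item.insert "icono" "fas fa-shopping-bag").insert "color_icono" "text-purple-500").insert "color_badge" "text-purple-800 bg-purple-100"
    else if PySem.Str.isIn "servicios" nombre then
      ((item.insert "icono" "fas fa-concierge-bell").insert "color_icono" "text-cyan-500").insert "color_badge" "text-cyan-800 bg-cyan-100"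
    else if PySem.Str.isIn "ocio" nombre || PySem.Str.isIn "entretenimiento" nombre then
      ((item.insert "icono" "fas fa-film").insert "color_icono" "text-green-500").insert "color_badge" "text-green-800 bg-green-100"
    else if PySem.Str.isIn "salud" nombre then
      ((item.insert "icono" "fas fa-heartbeat").insert "color_icono" "text-sky-500").insert "color_badge" "text-sky-800 bg-sky-100"
    else if PySem.Str.isIn "educación" nombre then
      ((item.insert "icono" "fas fa-book").insert "color_icono" "text-pink-500").insert "color_badge" "text-pink-800 bg-pink-100"
    else if PySem.Str.isIn "viaje" nombre || PySem.Str.isIn "vacaciones" nombre then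
      ((item.insert "icono" "fas fa-plane").insert "color_icono" "text-orange-500").insert "color_badge" "text-orange-800 bg-orange-100"
    else
      ((item.insert "icono" "fas fa-dollar-sign").insert "color_icono" "text-gray-500").insert "color_badge" "text-gray-800 bg-gray-100"
  item.items

def asignar_iconos_y_colores_categorias_gastos (items : List (List (String × String))) : List (List (String × String)) :=
  items.map pvProcessA

-- ===== PORT B =====
-- the flat keyword → rule-index dict KEYWORD_RULE (as an association list in insertion order)
def pvKeywordRule : List (String × Nat) := [
  ("comida", 0), ("alimentos", 0),
  ("hogar", 1), ("alquiler", 1),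
  ("transporte", 2), ("movilidad", 2),
  ("compras", 3), ("shopping", 3),
  ("servicios", 4),
  ("ocio", 5), ("entretenimiento", 5),
  ("salud", 6),
  ("educación", 7),
  ("viaje", 8), ("vacaciones", 8)]

-- the triple table TRIPLES
def pvTriples : List (String × String × String) := [
  ("fas fa-utensils", "text-yellow-500", "text-yellow-800 bg-yellow-100"),
  ("fas fa-home", "text-red-500", "text-red-800 bg-red-100"),
  ("fas fa-bus", "text-blue-500", "text-blue-800 bg-blue-100"),
  ("fas fa-shopping-bag", "text-purple-500", "text-purple-800 bg-purple-100"),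
  ("fas fa-concierge-bell", "text-cyan-500", "text-cyan-800 bg-cyan-100"),
  ("fas fa-film", "text-green-500", "text-green-800 bg-green-100"),
  ("fas fa-heartbeat", "text-sky-500", "text-sky-800 bg-sky-100"),
  ("fas fa-book", "text-pink-500", "text-pink-800 bg-pink-100"),
  ("fas fa-plane", "text-orange-500", "text-orange-800 bg-orange-100"),
  ("fas fa-dollar-sign", "text-gray-500", "text-gray-800 bg-gray-100")]

-- one loop iteration of B: min over the matching keyword indices (Python's
-- min(gen, default=len(TRIPLES)-1) = List.min? of the filtered indices, defaulted),
-- then TRIPLES[idx] (idx ≤ 9 < 10 always, so getD is exact)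
def pvProcessB (it : List (String × String)) : List (String × String) :=
  let item := PySem.Dict.mk it
  let nombre := PySem.Str.lower (item.getD "categoria" (item.getD "nombre" ""))
  let item := item.insert "color"
    (asignar_colores_categorias_gastos.getD nombre (asignar_colores_categorias_gastos.getD "otro" ""))
  let idx := (((pvKeywordRule.filter (fun p => PySem.Str.isIn p.1 nombre)).map
      (fun p => p.2)).min?).getD (pvTriples.length - 1)
  let t := pvTriples.getD idx ("", "", "")
  (((item.insert "icono" t.1).insert "color_icono" t.2.1).insert "color_badge" t.2.2).items

def asignar_iconos_y_colores_categorias_gastos_alt (items : List (List (String × String))) : List (List (String × String)) :=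
  items.map pvProcessB

-- ===== PRECONDITION & SPEC =====
def Spec_asignar_iconos_y_colores_categorias_gastos (items : List (List (String × String))) (out : List (List (String × String))) : Prop := out = asignar_iconos_y_colores_categorias_gastos_alt items
instance (items : List (List (String × String))) (out : List (List (String × String))) : Decidable (Spec_asignar_iconos_y_colores_categorias_gastos items out) := by unfold Spec_asignar_iconos_y_colores_categorias_gastos; infer_instance

-- ===== CLAIM =====
def Claim_equal_asignar_iconos_y_colores_categorias_gastos : Prop := ∀ (items : List (List (String × String))), Dom_asignar_iconos_y_colores_categorias_gastos items → Spec_asignar_iconos_y_colores_categorias_gastos items (asignar_iconos_y_colores_categorias_gastos items)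

-- ===== LEMMAS AND PROOFS =====
-- on a list whose indices are nondecreasing, the minimum matching index is the first match
theorem pvMin_filter_eq_find (l : List (String × Nat)) (p : String × Nat → Bool)
    (h : List.Pairwise (fun a b : String × Nat => a.2 ≤ b.2) l) :
    ((l.filter p).map (fun x => x.2)).min? = (l.find? p).map (fun x => x.2) := by
  induction l with
  | nil => rfl
  | cons a t ih =>
    have h1 := (List.pairwise_cons.mp h).1
    have ih' := ih (List.pairwise_cons.mp h).2
    by_cases hp : p a = true
    · simp only [List.filter_cons, hp, if_pos, List.map_cons, List.find?_cons, List.min?_cons,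
        Option.map_some]
      cases hm : ((t.filter p).map (fun x => x.2)).min? with
      | none => simp
      | some m =>
        have hmem : m ∈ (t.filter p).map (fun x => x.2) := List.min?_mem hm
        rcases List.mem_map.mp hmem with ⟨x, hx, rfl⟩
        have : a.2 ≤ x.2 := h1 x (List.mem_of_mem_filter hx)
        simp [Nat.min_eq_left this]
    · simp [hp, ih']

-- B's triple selection equals A's ladder, for any name string
theorem pvTriple_eq (n : String) :
    (pvTriples.getD ((((pvKeywordRule.filter (fun p => PySem.Str.isIn p.1 n)).map
        (fun p => p.2)).min?).getD (pvTriples.length - 1)) ("", "", "")) =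
    (if PySem.Str.isIn "comida" n || PySem.Str.isIn "alimentos" n then
      ("fas fa-utensils", "text-yellow-500", "text-yellow-800 bg-yellow-100")
    else if PySem.Str.isIn "hogar" n || PySem.Str.isIn "alquiler" n then
      ("fas fa-home", "text-red-500", "text-red-800 bg-red-100")
    else if PySem.Str.isIn "transporte" n || PySem.Str.isIn "movilidad" n then
      ("fas fa-bus", "text-blue-500", "text-blue-800 bg-blue-100")
    else if PySem.Str.isIn "compras" n || PySem.Str.isIn "shopping" n then
      ("fas fa-shopping-bag", "text-purple-500", "text-purple-800 bg-purple-100")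
    else if PySem.Str.isIn "servicios" n then
      ("fas fa-concierge-bell", "text-cyan-500", "text-cyan-800 bg-cyan-100")
    else if PySem.Str.isIn "ocio" n || PySem.Str.isIn "entretenimiento" n then
      ("fas fa-film", "text-green-500", "text-green-800 bg-green-100")
    else if PySem.Str.isIn "salud" n then
      ("fas fa-heartbeat", "text-sky-500", "text-sky-800 bg-sky-100")
    else if PySem.Str.isIn "educación" n then
      ("fas fa-book", "text-pink-500", "text-pink-800 bg-pink-100")
    else if PySem.Str.isIn "viaje" n || PySem.Str.isIn "vacaciones" n then
      ("fas fa-plane", "text-orange-500", "text-orange-800 bg-orange-100")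
    else
      ("fas fa-dollar-sign", "text-gray-500", "text-gray-800 bg-gray-100")) := by
  have hpw : List.Pairwise (fun a b : String × Nat => a.2 ≤ b.2) pvKeywordRule := by decide
  rw [pvMin_filter_eq_find _ _ hpw]
  simp only [pvKeywordRule, pvTriples, List.find?]
  cases h1 : PySem.Str.isIn "comida" n with
  | true => simp
  | false =>
  cases h2 : PySem.Str.isIn "alimentos" n with
  | true => simp
  | false =>
  cases h3 : PySem.Str.isIn "hogar" n with
  | true => simp
  | false =>
  cases h4 : PySem.Str.isIn "alquiler" n with
  | true => simp
  | false =>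
  cases h5 : PySem.Str.isIn "transporte" n with
  | true => simp
  | false =>
  cases h6 : PySem.Str.isIn "movilidad" n with
  | true => simp
  | false =>
  cases h7 : PySem.Str.isIn "compras" n with
  | true => simp
  | false =>
  cases h8 : PySem.Str.isIn "shopping" n with
  | true => simp
  | false =>
  cases h9 : PySem.Str.isIn "servicios" n with
  | true => simp
  | false =>
  cases h10 : PySem.Str.isIn "ocio" n with
  | true => simp
  | false =>
  cases h11 : PySem.Str.isIn "entretenimiento" n with
  | true => simp
  | false =>
  cases h12 : PySem.Str.isIn "salud" n with
  | true => simp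
  | false =>
  cases h13 : PySem.Str.isIn "educación" n with
  | true => simp
  | false =>
  cases h14 : PySem.Str.isIn "viaje" n with
  | true => simp
  | false =>
  cases h15 : PySem.Str.isIn "vacaciones" n with
  | true => simp
  | false => simp

theorem pvProcess_eq (it : List (String × String)) : pvProcessA it = pvProcessB it := by
  simp only [pvProcessA, pvProcessB]
  rw [pvTriple_eq]
  split_ifs <;> rfl

-- ===== VERDICT =====
theorem asignar_iconos_y_colores_categorias_gastos_spec : Claim_equal_asignar_iconos_y_colores_categorias_gastos := by
  intro items _
  unfold Spec_asignar_iconos_y_colores_categorias_gastos asignar_iconos_y_colores_categorias_gastos asignar_iconos_y_colores_categorias_gastos_alt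
  exact List.map_congr_left (fun it _ => pvProcess_eq it)
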